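-- pv_equiv track=rewrite | github.com/Alferdize/Data-Structure-and-Algorithms | Algorithms/binary_search.com/contest_8/K_subsequence.py | solve
-- ===== SOURCE A (Python) =====
-- def solve(A, K):
--     if not A:
--         return 0
--     freqmap = [[0]]
--     for i in range(1, len(A)):
--         ans_f = -1
--         for f in range(len(freqmap) - 1, -1, -1):
--             for h in freqmap[f]:
--                 if abs(A[h] - A[i]) <= K:
--                     ans_f = f
--                     break
--             if ans_f >= 0:
--                 break
--
--         ans_f += 1
--         if ans_f >= len(freqmap):
--             freqmap.append([i])
--         else:
--             freqmap[ans_f].append(i)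
--     return len(freqmap)
-- ===== SOURCE B (Python) =====
-- def solve(A, K):
--     # value-keyed DP: best[v] = highest level reached by any element of value v so far;
--     # each element's level is 1 + max level among values within K, and the answer is
--     # 1 + the maximum level (0 for an empty list).
--     best = {}
--     ans = 0
--     for x in A:
--         m = -1
--         for v, l in best.items():
--             if abs(v - x) <= K and l > m:
--                 m = l
--         lv = m + 1
--         if best.get(x, -1) < lv:
--             best[x] = lv
--         if lv + 1 > ans:
--             ans = lv + 1
--     return ans
-- ===== Notes on version B (the rewrite author's own statement) =====
-- stated objective: alternative
-- what changed: A keeps buckets of indices grouped by level and, per element, scans the buckets top-down with early breaks; B drops the bucket structure entirely and keeps a value-keyed map value->highest level, computing each element's level as 1 + max over map entries within K and tracking the answer in the same pass (duplicates collapse to one map entry).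
import Mathlib
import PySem

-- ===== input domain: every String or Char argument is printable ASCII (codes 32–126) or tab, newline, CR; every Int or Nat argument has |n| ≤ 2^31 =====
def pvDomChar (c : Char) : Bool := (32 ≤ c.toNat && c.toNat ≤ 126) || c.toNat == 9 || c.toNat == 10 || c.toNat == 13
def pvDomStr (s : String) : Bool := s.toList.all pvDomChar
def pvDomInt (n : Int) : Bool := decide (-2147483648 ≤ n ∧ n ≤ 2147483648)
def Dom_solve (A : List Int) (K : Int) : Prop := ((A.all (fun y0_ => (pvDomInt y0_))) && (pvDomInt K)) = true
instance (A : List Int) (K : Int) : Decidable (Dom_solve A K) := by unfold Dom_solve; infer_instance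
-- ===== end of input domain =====

-- B replaces A's level-bucket structure (buckets of indices scanned top-down with breaks)
-- by a single value-keyed map value -> highest level, updated and queried in one pass;
-- a genuinely different data structure, same quadratic worst case, no speed claim
-- (objective: alternative).

-- ===== PORT A =====
-- inner 'for h in freqmap[f]: if abs(A[h]-A[i]) <= K: ans_f = f; break' — break = first match
def hasMatchA (A : List Int) (K x : Int) : List Int → Bool
  | [] => false
  | h :: t =>
    if |(PySem.List.pyGet? A h).getD 0 - x| ≤ K then true else hasMatchA A K x t

-- 'for f in range(len(freqmap)-1, -1, -1): … if ans_f >= 0: break' — scan over the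
-- reversed bucket list; the current bucket index f is rest.length
def scanA (A : List Int) (K x : Int) : List (List Int) → Int
  | [] => -1
  | b :: rest =>
    if hasMatchA A K x b then (rest.length : Int) else scanA A K x rest

-- one iteration of the outer 'for i in range(1, len(A))'
def stepA (A : List Int) (K : Int) (fm : List (List Int)) (i : Int) : List (List Int) :=
  let x := (PySem.List.pyGet? A i).getD 0
  let ansf := scanA A K x fm.reverse + 1
  if (fm.length : Int) ≤ ansf then fm ++ [[i]]
  else fm.modify ansf.toNat (fun b => b ++ [i])

def solve (A : List Int) (K : Int) : Int :=
  if A.isEmpty then 0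
  else ((PySem.List.pyRange 1 (PySem.List.len A) 1).foldl (stepA A K) [[0]]).length

-- ===== PORT B =====
-- 'm = -1; for v, l in best.items(): if abs(v-x) <= K and l > m: m = l'
def bestMatch (K x : Int) (items : List (Int × Int)) : Int :=
  items.foldl (fun m vl => if |vl.1 - x| ≤ K ∧ m < vl.2 then vl.2 else m) (-1)

-- one iteration of 'for x in A' over the state (best, ans)
def stepB (K : Int) (s : PySem.Dict Int Int × Int) (x : Int) : PySem.Dict Int Int × Int :=
  let m := bestMatch K x s.1.items
  let lv := m + 1
  let d := if s.1.getD x (-1) < lv then s.1.insert x lv else s.1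
  let ans := if s.2 < lv + 1 then lv + 1 else s.2
  (d, ans)

def solve_alt (A : List Int) (K : Int) : Int :=
  (A.foldl (stepB K) (PySem.Dict.empty, 0)).2

-- ===== PRECONDITION & SPEC =====
def Spec_solve (A : List Int) (K : Int) (out : Int) : Prop := out = solve_alt A K
instance (A : List Int) (K : Int) (out : Int) : Decidable (Spec_solve A K out) := by unfold Spec_solve; infer_instance

-- ===== CLAIM (what is proved, stated in full; the proofs are below) =====
def Claim_equal_solve : Prop := ∀ (A : List Int) (K : Int), Dom_solve A K → Spec_solve A K (solve A K)

-- ===== LEMMAS AND PROOFS =====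

-- the common DP both programs compute: P is the list of (value, level) pairs of the
-- processed prefix; each new element gets level 1 + bestMatch over the prefix
def stepP (K : Int) (P : List (Int × Int)) (x : Int) : List (Int × Int) :=
  P ++ [(x, bestMatch K x P + 1)]

-- maximum level in P (−1 for empty)
def maxSnd (P : List (Int × Int)) : Int :=
  P.foldl (fun m vl => if m < vl.2 then vl.2 else m) (-1)

-- ---- generic facts about bestMatch / maxSnd ----

theorem bestMatch_init_le (K x : Int) (L : List (Int × Int)) (a : Int) :
    a ≤ L.foldl (fun m vl => if |vl.1 - x| ≤ K ∧ m < vl.2 then vl.2 else m) a := by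
  induction L generalizing a with
  | nil => simp
  | cons p t ih =>
    refine le_trans ?_ (ih _)
    dsimp only
    split <;> omega

theorem neg_one_le_bestMatch (K x : Int) (L : List (Int × Int)) :
    -1 ≤ bestMatch K x L := bestMatch_init_le K x L (-1)

theorem le_bestMatch_of_mem {K x v l : Int} {L : List (Int × Int)}
    (h : (v, l) ∈ L) (hm : |v - x| ≤ K) : l ≤ bestMatch K x L := by
  unfold bestMatch
  generalize (-1 : Int) = a
  induction L generalizing a with
  | nil => simp at h
  | cons p t ih =>
    rcases List.mem_cons.mp h with h | h
    · subst h
      refine le_trans ?_ (bestMatch_init_le K x t _)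
      dsimp only
      simp only [hm, true_and]
      split <;> omega
    · exact ih h _

theorem bestMatch_cases (K x : Int) (L : List (Int × Int)) :
    bestMatch K x L = -1 ∨
      ∃ v l, (v, l) ∈ L ∧ |v - x| ≤ K ∧ bestMatch K x L = l := by
  unfold bestMatch
  have H : ∀ (a : Int),
      L.foldl (fun m vl => if |vl.1 - x| ≤ K ∧ m < vl.2 then vl.2 else m) a = a ∨
        ∃ v l, (v, l) ∈ L ∧ |v - x| ≤ K ∧
          L.foldl (fun m vl => if |vl.1 - x| ≤ K ∧ m < vl.2 then vl.2 else m) a = l := by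
    induction L with
    | nil => intro a; left; rfl
    | cons p t ih =>
      intro a
      simp only [List.foldl_cons]
      rcases ih (if |p.1 - x| ≤ K ∧ a < p.2 then p.2 else a) with h | h
      · rw [h]
        by_cases hc : |p.1 - x| ≤ K ∧ a < p.2
        · right; exact ⟨p.1, p.2, List.mem_cons_self, hc.1, by simp [hc]⟩
        · left; simp [hc]
      · right
        obtain ⟨v, l, hmem, hK, he⟩ := h
        exact ⟨v, l, List.mem_cons_of_mem _ hmem, hK, he⟩
  exact H (-1)

theorem bestMatch_append_singleton (K x : Int) (L : List (Int × Int)) (p : Int × Int) :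
    bestMatch K x (L ++ [p]) =
      if |p.1 - x| ≤ K ∧ bestMatch K x L < p.2 then p.2 else bestMatch K x L := by
  unfold bestMatch
  rw [List.foldl_append]
  rfl

theorem maxSnd_init_le (P : List (Int × Int)) (a : Int) :
    a ≤ P.foldl (fun m vl => if m < vl.2 then vl.2 else m) a := by
  induction P generalizing a with
  | nil => simp
  | cons p t ih =>
    refine le_trans ?_ (ih _)
    dsimp only
    split <;> omega

theorem neg_one_le_maxSnd (P : List (Int × Int)) : -1 ≤ maxSnd P :=
  maxSnd_init_le P (-1)

theorem le_maxSnd_of_mem {v l : Int} {P : List (Int × Int)} (h : (v, l) ∈ P) :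
    l ≤ maxSnd P := by
  unfold maxSnd
  generalize (-1 : Int) = a
  induction P generalizing a with
  | nil => simp at h
  | cons p t ih =>
    rcases List.mem_cons.mp h with h | h
    · subst h
      refine le_trans ?_ (maxSnd_init_le t _)
      dsimp only
      split <;> omega
    · exact ih h _

theorem maxSnd_append_singleton (P : List (Int × Int)) (p : Int × Int) :
    maxSnd (P ++ [p]) = if maxSnd P < p.2 then p.2 else maxSnd P := by
  unfold maxSnd
  rw [List.foldl_append]
  rfl

theorem bestMatch_le_maxSnd (K x : Int) (P : List (Int × Int)) :
    bestMatch K x P ≤ maxSnd P := by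
  rcases bestMatch_cases K x P with h | ⟨v, l, hmem, _, he⟩
  · rw [h]; exact neg_one_le_maxSnd P
  · rw [he]; exact le_maxSnd_of_mem hmem

-- ---- the level list of a prefix ----

theorem fst_foldl_stepP (K : Int) (l : List Int) (P : List (Int × Int)) :
    (l.foldl (stepP K) P).map Prod.fst = P.map Prod.fst ++ l := by
  induction l generalizing P with
  | nil => simp
  | cons x t ih => simp [List.foldl_cons, ih, stepP]

theorem snd_nonneg_foldl_stepP (K : Int) (l : List Int) (P : List (Int × Int))
    (h0 : ∀ p ∈ P, 0 ≤ p.2) : ∀ p ∈ l.foldl (stepP K) P, 0 ≤ p.2 := by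
  induction l generalizing P with
  | nil => exact h0
  | cons x t ih =>
    simp only [List.foldl_cons]
    apply ih
    intro p hp
    rcases List.mem_append.mp hp with hp | hp
    · exact h0 p hp
    · simp only [List.mem_singleton] at hp
      subst hp
      have := neg_one_le_bestMatch K x P
      simp only
      omega

-- ---- A-side: characterisation of the bucket scan ----

theorem hasMatchA_iff (A : List Int) (K x : Int) (b : List Int) :
    hasMatchA A K x b = true ↔
      ∃ j ∈ b, |(PySem.List.pyGet? A j).getD 0 - x| ≤ K := by
  induction b with
  | nil => simp [hasMatchA]
  | cons h t ih =>
    simp only [hasMatchA]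
    split
    · simp only [true_iff]
      exact ⟨h, List.mem_cons_self, by assumption⟩
    · rw [ih]
      constructor
      · rintro ⟨j, hj, hK⟩; exact ⟨j, List.mem_cons_of_mem _ hj, hK⟩
      · rintro ⟨j, hj, hK⟩
        rcases List.mem_cons.mp hj with rfl | hj
        · exact absurd hK (by assumption)
        · exact ⟨j, hj, hK⟩

theorem neg_one_le_scanA (A : List Int) (K x : Int) (L : List (List Int)) :
    -1 ≤ scanA A K x L := by
  induction L with
  | nil => simp [scanA]
  | cons b rest ih =>
    simp only [scanA]
    split
    · omega
    · exact ih

theorem le_scanA_rev (A : List Int) (K x : Int) (fm : List (List Int)) :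
    ∀ (f : Nat) (b : List Int), fm[f]? = some b → hasMatchA A K x b = true →
      (f : Int) ≤ scanA A K x fm.reverse := by
  induction fm using List.reverseRecOn with
  | nil => intro f b hb; simp at hb
  | append_singleton l c ih =>
    intro f b hb hm
    rw [List.reverse_append, List.reverse_singleton, List.singleton_append]
    simp only [scanA, List.length_reverse]
    rcases lt_or_ge f l.length with hf | hf
    · rw [List.getElem?_append_left (by omega)] at hb
      have := ih f b hb hm
      split
      · have : f < l.length := hf
        omega
      · exact this
    · have hfe : f = l.length := by
        have hlen : f < l.length + 1 := by
          have := List.getElem?_eq_some_iff.mp hb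
          simpa using this.1
        omega
      subst hfe
      rw [List.getElem?_append_right (by omega)] at hb
      simp at hb
      subst hb
      rw [hm]
      simp

theorem scanA_rev_cases (A : List Int) (K x : Int) (fm : List (List Int)) :
    scanA A K x fm.reverse = -1 ∨
      ∃ (f : Nat) (b : List Int), fm[f]? = some b ∧ hasMatchA A K x b = true ∧
        scanA A K x fm.reverse = (f : Int) := by
  induction fm using List.reverseRecOn with
  | nil => left; simp [scanA]
  | append_singleton l c ih =>
    rw [List.reverse_append, List.reverse_singleton, List.singleton_append]
    simp only [scanA, List.length_reverse]
    by_cases hc : hasMatchA A K x c = true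
    · right
      refine ⟨l.length, c, ?_, hc, by simp [hc]⟩
      rw [List.getElem?_append_right (by omega)]
      simp
    · rw [if_neg hc]
      rcases ih with h | ⟨f, b, hb, hm, he⟩
      · left; exact h
      · right
        have hf : f < l.length := by
          have := List.getElem?_eq_some_iff.mp hb
          exact this.1
        exact ⟨f, b, by rw [List.getElem?_append_left (by omega)]; exact hb, hm, he⟩

-- ---- A-side invariant ----

def AInv (i : Nat) (P : List (Int × Int)) (fm : List (List Int)) : Prop :=
  (fm.length : Int) = maxSnd P + 1 ∧
  P.length = i ∧
  (∀ (f : Nat) (j : Int),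
    (∃ b, fm[f]? = some b ∧ j ∈ b) ↔
      (∃ n : Nat, j = (n : Int) ∧ ∃ v, P[n]? = some (v, (f : Int))))

-- values in P are the prefix of A
theorem P_fst (A : List Int) (K : Int) (i : Nat) {n : Nat} {v l : Int}
    (h : ((A.take i).foldl (stepP K) [])[n]? = some (v, l)) :
    A[n]? = some v ∧ n < i := by
  have hfst := fst_foldl_stepP K (A.take i) []
  simp only [List.map_nil, List.nil_append] at hfst
  have h1 : (A.take i)[n]? = some v := by
    rw [← hfst]
    simp [List.getElem?_map, h]
  rcases List.getElem?_eq_some_iff.mp h1 with ⟨hlt, hv⟩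
  have hlt' := hlt
  simp only [List.length_take] at hlt'
  refine ⟨?_, by omega⟩
  rw [List.getElem_take] at hv
  rw [List.getElem?_eq_getElem (by omega)]
  rw [hv]

theorem stepP_getElem?_left {K : Int} {P : List (Int × Int)} {x : Int} {n : Nat}
    (h : n < P.length) : (stepP K P x)[n]? = P[n]? := by
  simp [stepP, List.getElem?_append_left h]

-- under the invariant the bucket scan computes exactly bestMatch over P
theorem scanA_eq_bestMatch (A : List Int) (K : Int) (i : Nat) (x : Int)
    (P : List (Int × Int)) (fm : List (List Int))
    (hP : P = (A.take i).foldl (stepP K) [])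
    (hinv : AInv i P fm) :
    scanA A K x fm.reverse = bestMatch K x P := by
  obtain ⟨hlen, hPlen, hmem⟩ := hinv
  have hnn : ∀ p ∈ P, 0 ≤ p.2 := by
    subst hP; exact snd_nonneg_foldl_stepP K _ [] (by simp)
  apply le_antisymm
  · rcases scanA_rev_cases A K x fm with h | ⟨f, b, hb, hm, he⟩
    · rw [h]; exact neg_one_le_bestMatch K x P
    · rw [he]
      obtain ⟨j, hj, hK⟩ := (hasMatchA_iff A K x b).mp hm
      obtain ⟨n, rfl, v, hn⟩ := (hmem f j).mp ⟨b, hb, hj⟩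
      have hv := (P_fst A K i (hP ▸ hn)).1
      have hget : (PySem.List.pyGet? A (n : Int)).getD 0 = v := by
        rw [PySem.List.pyGet?_natCast, hv]; rfl
      rw [hget] at hK
      exact le_bestMatch_of_mem (List.mem_of_getElem? hn) hK
  · rcases bestMatch_cases K x P with h | ⟨v, l, hmemP, hK, he⟩
    · rw [h]; exact neg_one_le_scanA A K x fm.reverse
    · rw [he]
      obtain ⟨n, hn⟩ := List.getElem?_of_mem hmemP
      have hl0 : 0 ≤ l := hnn _ hmemP
      obtain ⟨f, rfl⟩ : ∃ f : Nat, l = (f : Int) := ⟨l.toNat, by omega⟩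
      obtain ⟨b, hb, hj⟩ := (hmem f (n : Int)).mpr ⟨n, rfl, v, hn⟩
      apply le_scanA_rev A K x fm f b hb
      rw [hasMatchA_iff]
      refine ⟨(n : Int), hj, ?_⟩
      have hv := (P_fst A K i (hP ▸ hn)).1
      rw [PySem.List.pyGet?_natCast, hv]
      exact hK

-- one step of A preserves the invariant
theorem stepA_inv (A : List Int) (K : Int) (i : Nat)
    (P : List (Int × Int)) (fm : List (List Int))
    (hiA : i < A.length)
    (hP : P = (A.take i).foldl (stepP K) [])
    (hinv : AInv i P fm) :
    AInv (i + 1) (stepP K P A[i]) (stepA A K fm (i : Int)) := by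
  obtain ⟨hlen, hPlen, hmem⟩ := hinv
  have hx : (PySem.List.pyGet? A (i : Int)).getD 0 = A[i] := by
    rw [PySem.List.pyGet?_natCast, List.getElem?_eq_getElem hiA]; rfl
  have hscan := scanA_eq_bestMatch A K i A[i] P fm hP ⟨hlen, hPlen, hmem⟩
  set bm := bestMatch K A[i] P with hbm
  have hbm_le : bm ≤ maxSnd P := bestMatch_le_maxSnd K A[i] P
  have hbm_ge : -1 ≤ bm := neg_one_le_bestMatch K A[i] P
  simp only [stepA]
  rw [hx, hscan]
  have hP'len : (stepP K P A[i]).length = i + 1 := by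
    simp [stepP, hPlen]
  have hmaxP' : maxSnd (stepP K P A[i]) = if maxSnd P < bm + 1 then bm + 1 else maxSnd P := by
    simp [stepP, maxSnd_append_singleton, ← hbm]
  by_cases hbig : (fm.length : Int) ≤ bm + 1
  · -- append branch: bm + 1 = fm.length = maxSnd P + 1
    rw [if_pos hbig]
    have heq : bm = maxSnd P := by omega
    refine ⟨?_, hP'len, ?_⟩
    · rw [hmaxP']
      simp only [heq]
      rw [if_pos (by omega)]
      simp
      omega
    · intro f j
      rcases lt_trichotomy f fm.length with hf | hf | hf
      · -- old bucket
        rw [List.getElem?_append_left (by omega)]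
        rw [hmem f j]
        constructor
        · rintro ⟨n, rfl, v, hn⟩
          refine ⟨n, rfl, v, ?_⟩
          have : n < P.length := (List.getElem?_eq_some_iff.mp hn).1
          rw [stepP_getElem?_left this]; exact hn
        · rintro ⟨n, rfl, v, hn⟩
          refine ⟨n, rfl, v, ?_⟩
          simp only [stepP, List.getElem?_append] at hn
          split at hn
          · exact hn
          · -- new entry has level bm+1 = fm.length ≠ f
            rcases List.getElem?_eq_some_iff.mp hn with ⟨hlt, hv⟩
            simp only [List.getElem_singleton] at hv
            have : ((f : Int)) = bm + 1 := by
              have := congrArg Prod.snd hv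
              simpa using this.symm
            omega
      · -- the new bucket f = fm.length
        subst hf
        rw [List.getElem?_append_right (by omega)]
        simp only [Nat.sub_self, List.getElem?_cons_zero]
        constructor
        · rintro ⟨b, hb, hj⟩
          obtain rfl : b = [(i : Int)] := by injection hb with h; exact h.symm
          simp only [List.mem_singleton] at hj
          subst hj
          refine ⟨P.length, by rw [hPlen], A[i], ?_⟩
          simp only [stepP, List.getElem?_append_right (le_refl _), Nat.sub_self,
            List.getElem?_cons_zero]
          congr 2
          omega
        · rintro ⟨n, rfl, v, hn⟩
          simp only [stepP, List.getElem?_append] at hn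
          split at hn
          · -- impossible: old levels ≤ maxSnd P < fm.length
            exfalso
            have hm := le_maxSnd_of_mem (List.mem_of_getElem? hn)
            simp at hm
            omega
          · rcases List.getElem?_eq_some_iff.mp hn with ⟨hlt, _⟩
            simp only [List.length_singleton] at hlt
            have : n = P.length := by omega
            subst this
            exact ⟨[(i : Int)], rfl, by simp [hPlen]⟩
      · -- beyond both: nothing on either side
        constructor
        · rintro ⟨b, hb, hj⟩
          exfalso
          have := (List.getElem?_eq_some_iff.mp hb).1
          simp at this
          omega
        · rintro ⟨n, rfl, v, hn⟩
          exfalso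
          have hm := le_maxSnd_of_mem (List.mem_of_getElem? hn)
          rw [hmaxP'] at hm
          simp only [heq] at hm
          rw [if_pos (by omega)] at hm
          omega
  · -- modify branch: bm + 1 < fm.length
    rw [if_neg hbig]
    have hlt : bm + 1 < (fm.length : Int) := by omega
    have htoNat : ((bm + 1).toNat : Int) = bm + 1 := by omega
    refine ⟨?_, hP'len, ?_⟩
    · rw [hmaxP', List.length_modify]
      rw [if_neg (by omega)]
      exact hlen
    · intro f j
      rw [List.getElem?_modify]
      by_cases hf : (bm + 1).toNat = f
      · -- the modified bucket
        subst hf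
        constructor
        · rintro ⟨b, hb, hj⟩
          rcases hfm : fm[(bm + 1).toNat]? with _ | b0
          · rw [hfm] at hb; simp at hb
          · rw [hfm] at hb
            obtain rfl : b = b0 ++ [(i : Int)] := by injection hb with h; simpa using h.symm
            rcases List.mem_append.mp hj with hj | hj
            · obtain ⟨n, rfl, v, hn⟩ := (hmem _ j).mp ⟨b0, hfm, hj⟩
              refine ⟨n, rfl, v, ?_⟩
              have : n < P.length := (List.getElem?_eq_some_iff.mp hn).1
              rw [stepP_getElem?_left this]; exact hn
            · simp only [List.mem_singleton] at hj
              subst hj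
              refine ⟨P.length, by rw [hPlen], A[i], ?_⟩
              simp only [stepP, List.getElem?_append_right (le_refl _), Nat.sub_self,
                List.getElem?_cons_zero]
              congr 2
              omega
        · rintro ⟨n, rfl, v, hn⟩
          simp only [stepP, List.getElem?_append] at hn
          split at hn
          · obtain ⟨b0, hfm, hj⟩ := (hmem _ (n : Int)).mpr ⟨n, rfl, v, hn⟩
            exact ⟨b0 ++ [(i : Int)], by rw [hfm]; simp, List.mem_append_left _ hj⟩
          · rcases List.getElem?_eq_some_iff.mp hn with ⟨hlt2, _⟩
            simp only [List.length_singleton] at hlt2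
            have hne : n = P.length := by omega
            subst hne
            rcases hfm : fm[(bm + 1).toNat]? with _ | b0
            · exfalso
              have := List.getElem?_eq_none_iff.mp hfm
              omega
            · exact ⟨b0 ++ [(i : Int)], by simp,
                by rw [hPlen]; exact List.mem_append_right _ (by simp)⟩
      · -- untouched bucket f ≠ (bm+1).toNat
        have hsame : (fun a => if (bm + 1).toNat = f then a ++ [(i : Int)] else a) <$> fm[f]?
            = fm[f]? := by
          rcases h : fm[f]? with _ | b
          · rfl
          · simp [hf]
        rw [hsame, hmem f j]
        constructor
        · rintro ⟨n, rfl, v, hn⟩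
          refine ⟨n, rfl, v, ?_⟩
          have : n < P.length := (List.getElem?_eq_some_iff.mp hn).1
          rw [stepP_getElem?_left this]; exact hn
        · rintro ⟨n, rfl, v, hn⟩
          refine ⟨n, rfl, v, ?_⟩
          simp only [stepP, List.getElem?_append] at hn
          split at hn
          · exact hn
          · exfalso
            rcases List.getElem?_eq_some_iff.mp hn with ⟨hlt2, hv⟩
            simp only [List.getElem_singleton] at hv
            have : ((f : Int)) = bm + 1 := by
              have := congrArg Prod.snd hv
              simpa using this.symm
            omega

-- the A-side fold maintains the invariant from prefix length 1 up to i
theorem A_fold_inv (A : List Int) (K : Int) (i : Nat)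
    (h1 : 1 ≤ i) (hn : i ≤ A.length) :
    AInv i ((A.take i).foldl (stepP K) [])
      ((PySem.List.pyRange 1 (i : Int) 1).foldl (stepA A K) [[0]]) := by
  induction i with
  | zero => omega
  | succ m ih =>
    rcases Nat.lt_or_ge m 1 with hm | hm
    · -- base case i = 1
      have : m = 0 := by omega
      subst this
      have hA0 : 0 < A.length := by omega
      have htake : A.take 1 = [A[0]] := by
        rcases A with _ | ⟨a, t⟩
        · simp at hA0
        · simp
      have hrange : PySem.List.pyRange 1 (1 : Int) 1 = [] := by decide
      simp only [Nat.zero_add, Nat.cast_one]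
      rw [hrange, htake]
      simp only [List.foldl_nil, List.foldl_cons]
      constructor
      · simp [stepP, maxSnd, bestMatch]
      constructor
      · simp [stepP]
      · intro f j
        constructor
        · rintro ⟨b, hb, hj⟩
          rcases List.getElem?_eq_some_iff.mp hb with ⟨hf, hv⟩
          simp only [List.length_singleton] at hf
          have : f = 0 := by omega
          subst this
          simp only [List.getElem_singleton] at hv
          subst hv
          simp only [List.mem_singleton] at hj
          subst hj
          exact ⟨0, rfl, A[0], by simp [stepP, bestMatch]⟩
        · rintro ⟨n, rfl, v, hnv⟩
          simp only [stepP, List.nil_append] at hnv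
          rcases List.getElem?_eq_some_iff.mp hnv with ⟨hn2, hv⟩
          simp only [List.length_singleton] at hn2
          have : n = 0 := by omega
          subst this
          simp only [List.getElem_singleton, bestMatch, List.foldl_nil] at hv
          have hf0 : ((f : Int)) = 0 := by
            have := congrArg Prod.snd hv
            simp at this
            omega
          have : f = 0 := by omega
          subst this
          exact ⟨[0], rfl, by simp⟩
    · -- inductive step
      have hinv := ih hm (by omega)
      have hmA : m < A.length := by omega
      have hrange : PySem.List.pyRange 1 ((m + 1 : Nat) : Int) 1
          = PySem.List.pyRange 1 (m : Int) 1 ++ [(m : Int)] := by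
        push_cast
        exact PySem.List.pyRange_one_succ_right (by exact_mod_cast hm)
      have htake : A.take (m + 1) = A.take m ++ [A[m]] := by
        rw [List.take_add_one, List.getElem?_eq_getElem hmA]
        rfl
      rw [hrange, List.foldl_append, List.foldl_cons, List.foldl_nil, htake,
        List.foldl_append, List.foldl_cons, List.foldl_nil]
      exact stepA_inv A K m _ _ hmA rfl hinv

-- ---- B-side invariant ----

def DInv (d : PySem.Dict Int Int) (P : List (Int × Int)) : Prop :=
  d.keys.Nodup ∧
  (∀ v : Int, v ∈ d.keys ↔ v ∈ P.map Prod.fst) ∧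
  (∀ v : Int, d.getD v (-1) = bestMatch 0 v P)

-- |w - v| ≤ 0 ↔ w = v, so bestMatch 0 v P is "highest level of value v in P"
theorem abs_le_zero_iff (w v : Int) : |w - v| ≤ 0 ↔ w = v := by
  rw [abs_nonpos_iff]
  omega

theorem bestMatch_dict_eq (K x : Int) (d : PySem.Dict Int Int) (P : List (Int × Int))
    (hinv : DInv d P) : bestMatch K x d.items = bestMatch K x P := by
  obtain ⟨hnd, hkeys, hval⟩ := hinv
  apply le_antisymm
  · rcases bestMatch_cases K x d.items with h | ⟨v, l, hmem, hK, he⟩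
    · rw [h]; exact neg_one_le_bestMatch K x P
    · rw [he]
      have hl : l = bestMatch 0 v P := by
        rw [← hval v]
        exact (PySem.Dict.getD_of_mem_items d hmem hnd (-1)).symm
      rcases bestMatch_cases 0 v P with h0 | ⟨w, l', hmem', hw, he'⟩
      · rw [hl, h0]; exact neg_one_le_bestMatch K x P
      · rw [hl, he']
        rw [abs_le_zero_iff] at hw
        subst hw
        exact le_bestMatch_of_mem hmem' hK
  · rcases bestMatch_cases K x P with h | ⟨v, l, hmem, hK, he⟩
    · rw [h]; exact neg_one_le_bestMatch K x d.items
    · rw [he]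
      have hvk : v ∈ d.keys := by
        rw [hkeys]
        exact List.mem_map_of_mem hmem
      obtain ⟨w, hw⟩ : ∃ w, d.get? v = some w := by
        rcases h : d.get? v with _ | w
        · exact absurd ((PySem.Dict.get?_eq_none_iff_not_mem_keys d v).mp h) (by simpa)
        · exact ⟨w, rfl⟩
      have hitems := PySem.Dict.mem_items_of_get?_eq_some d hw
      have hgd : d.getD v (-1) = w := by
        rw [PySem.Dict.getD_eq_get?_getD, hw]; rfl
      have hlw : l ≤ w := by
        rw [← hgd, hval v]
        exact le_bestMatch_of_mem hmem (by rw [abs_le_zero_iff])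
      exact le_trans hlw (le_bestMatch_of_mem hitems hK)

theorem stepB_DInv (K x : Int) (d : PySem.Dict Int Int) (P : List (Int × Int))
    (hinv : DInv d P) :
    DInv (if d.getD x (-1) < bestMatch K x d.items + 1
          then d.insert x (bestMatch K x d.items + 1) else d)
         (stepP K P x) := by
  obtain ⟨hnd, hkeys, hval⟩ := hinv
  have hbm := bestMatch_dict_eq K x d P ⟨hnd, hkeys, hval⟩
  rw [hbm]
  set lv := bestMatch K x P + 1 with hlv
  have hval' : ∀ v : Int, bestMatch 0 v (stepP K P x) =
      if x = v ∧ bestMatch 0 v P < lv then lv else bestMatch 0 v P := by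
    intro v
    rw [stepP, bestMatch_append_singleton]
    simp only [abs_le_zero_iff, hlv]
  split
  · rename_i hins
    refine ⟨PySem.Dict.nodup_keys_insert d x lv hnd, ?_, ?_⟩
    · intro v
      rw [PySem.Dict.mem_keys_insert, hkeys v, stepP]
      simp only [List.map_append, List.map_cons, List.map_nil, List.mem_append,
        List.mem_singleton]
      tauto
    · intro v
      rw [PySem.Dict.getD_insert, hval' v]
      by_cases hv : v = x
      · subst hv
        rw [if_pos rfl, if_pos ⟨rfl, by rw [← hval v]; exact hins⟩]
      · rw [if_neg hv, if_neg (fun hc => hv hc.1.symm), hval v]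
  · rename_i hins
    rw [not_lt] at hins
    rw [hval x] at hins
    -- x is already a key: bestMatch 0 x P ≥ lv ≥ 0 > -1
    have hx_old : bestMatch 0 x P ≠ -1 := by
      have := neg_one_le_bestMatch K x P
      omega
    have hxP : x ∈ P.map Prod.fst := by
      rcases bestMatch_cases 0 x P with h | ⟨w, l, hmem, hw, _⟩
      · exact absurd h hx_old
      · rw [abs_le_zero_iff] at hw
        subst hw
        exact List.mem_map_of_mem hmem
    refine ⟨hnd, ?_, ?_⟩
    · intro v
      rw [hkeys v, stepP]
      simp only [List.map_append, List.map_cons, List.map_nil, List.mem_append,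
        List.mem_singleton]
      constructor
      · exact Or.inl
      · rintro (h | rfl)
        · exact h
        · exact hxP
    · intro v
      rw [hval' v, hval v]
      by_cases hv : v = x
      · subst hv
        rw [if_neg (by omega)]
      · rw [if_neg (fun hc => hv hc.1.symm)]

-- the B-side fold: the answer component tracks maxSnd P + 1
theorem B_fold (K : Int) (l : List Int) (d : PySem.Dict Int Int)
    (ans : Int) (P : List (Int × Int))
    (hinv : DInv d P) (hans : ans = maxSnd P + 1) :
    DInv (l.foldl (stepB K) (d, ans)).1 (l.foldl (stepP K) P) ∧
      (l.foldl (stepB K) (d, ans)).2 = maxSnd (l.foldl (stepP K) P) + 1 := by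
  induction l generalizing d ans P with
  | nil => exact ⟨hinv, hans⟩
  | cons x t ih =>
    simp only [List.foldl_cons]
    have hbm := bestMatch_dict_eq K x d P hinv
    have hstep : stepB K (d, ans) x =
        ((if d.getD x (-1) < bestMatch K x d.items + 1
          then d.insert x (bestMatch K x d.items + 1) else d),
         (if ans < bestMatch K x d.items + 1 + 1
          then bestMatch K x d.items + 1 + 1 else ans)) := rfl
    rw [hstep]
    apply ih
    · exact stepB_DInv K x d P hinv
    · rw [hbm, hans]
      have : maxSnd (stepP K P x) =
          if maxSnd P < bestMatch K x P + 1 then bestMatch K x P + 1 else maxSnd P := by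
        simp [stepP, maxSnd_append_singleton]
      rw [this]
      split <;> split <;> omega

theorem DInv_empty : DInv PySem.Dict.empty [] := by
  refine ⟨by simp [PySem.Dict.keys, PySem.Dict.empty], ?_, ?_⟩
  · intro v; simp [PySem.Dict.keys, PySem.Dict.empty]
  · intro v; simp [PySem.Dict.getD_empty, bestMatch]

theorem solve_alt_eq (A : List Int) (K : Int) :
    solve_alt A K = maxSnd (A.foldl (stepP K) []) + 1 := by
  unfold solve_alt
  exact (B_fold K A PySem.Dict.empty 0 [] DInv_empty (by simp [maxSnd])).2

-- ===== VERDICT (by name: the statement is the Claim_ definition above) =====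
theorem solve_spec : Claim_equal_solve := by
  intro A K _
  unfold Spec_solve
  rw [solve_alt_eq]
  unfold solve
  by_cases hA : A.isEmpty
  · rw [if_pos hA]
    rw [List.isEmpty_iff.mp hA]
    simp [maxSnd]
  · rw [if_neg hA]
    have hlen : 1 ≤ A.length := by
      rcases A with _ | _
      · simp at hA
      · simp
    have hinv := A_fold_inv A K A.length hlen (le_refl _)
    rw [List.take_length] at hinv
    have hLen : PySem.List.len A = (A.length : Int) := by
      simp [PySem.List.len_eq]
    rw [hLen]
    exact hinv.1
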